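-- pv_equiv track=rewrite | github.com/dvkonovalov/JPEG2000 | main.py | update_destribution
-- ===== SOURCE A (Python) =====
-- def update_destribution(distribution, element):
--     pr = 0
--     for i in distribution:
--         distribution[i][0] += pr
--         distribution[i][1] += pr
--         if i == element:
--             distribution[i][1] += 1
--             pr += 1
--     return distribution
-- ===== SOURCE B (Python) =====
-- def update_destribution(distribution, element):
--     # Locate element, bump its upper bound, then add 1 to both fields of every
--     # later entry -- instead of threading a cumulative offset over all entries.
--     if element not in distribution:
--         return distribution
--     keys = list(distribution)
--     idx = keys.index(element)
--     distribution[element][1] += 1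
--     for k in keys[idx + 1:]:
--         distribution[k][0] += 1
--         distribution[k][1] += 1
--     return distribution
-- ===== Notes on version B (the rewrite author's own statement) =====
-- stated objective: alternative
-- what changed: Replaces the threaded cumulative-offset accumulator over every entry by locate-the-element, one targeted increment there, and a +1 pass over only the tail entries; entries before the element (and the whole dict when the element is absent) are not touched at all.
import Mathlib
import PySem

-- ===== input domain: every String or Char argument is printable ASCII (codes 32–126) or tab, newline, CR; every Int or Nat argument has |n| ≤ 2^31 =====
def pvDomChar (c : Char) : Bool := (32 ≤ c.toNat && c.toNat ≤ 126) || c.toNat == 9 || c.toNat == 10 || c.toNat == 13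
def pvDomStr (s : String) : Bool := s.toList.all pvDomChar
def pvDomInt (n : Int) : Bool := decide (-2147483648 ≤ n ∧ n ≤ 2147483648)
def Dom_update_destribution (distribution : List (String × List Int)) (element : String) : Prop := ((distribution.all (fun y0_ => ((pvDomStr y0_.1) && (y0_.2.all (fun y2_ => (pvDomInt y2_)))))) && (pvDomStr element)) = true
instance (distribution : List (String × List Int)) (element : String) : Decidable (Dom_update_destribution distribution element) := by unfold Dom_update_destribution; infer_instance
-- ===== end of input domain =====

-- B replaces A's threaded cumulative-offset pass over every dict entry by
-- locate-then-targeted-tail-pass (alternative decomposition, same cost).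
-- Both Pythons mutate the dict in place; the equivalence proved is about the
-- returned value (the updated dict), identical to the mutation both perform.

-- v[j] += x  (exact when j < v.length; Pre_ guarantees value lists have length ≥ 2)
def pvBump (j : Nat) (x : Int) (v : List Int) : List Int := v.set j (v.getD j 0 + x)

-- distribution[k] = f(distribution[k]) on the assoc list (first match; keys are
-- unique under Pre_, as in a Python dict); exact when k is a present key.
def pvDmod (d : List (String × List Int)) (k : String) (f : List Int → List Int) :
    List (String × List Int) :=
  match d with
  | [] => []
  | (k', v) :: rest => if k' = k then (k', f v) :: rest else (k', v) :: pvDmod rest k f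

-- ===== PORT A =====
def update_destribution (distribution : List (String × List Int)) (element : String) : List (String × List Int) :=
  ((distribution.map Prod.fst).foldl
    (fun st i =>
      let d := pvDmod st.1 i (pvBump 0 st.2)       -- distribution[i][0] += pr
      let d := pvDmod d i (pvBump 1 st.2)          -- distribution[i][1] += pr
      if i = element then (pvDmod d i (pvBump 1 1), st.2 + 1) else (d, st.2))
    (distribution, 0)).1

-- ===== PORT B =====
-- 'element in distribution' + 'keys.index(element)' are ported together as index?:
-- none exactly when the membership test fails.
def update_destribution_alt (distribution : List (String × List Int)) (element : String) : List (String × List Int) :=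
  let keys := distribution.map Prod.fst
  match PySem.List.index? keys element with
  | none => distribution
  | some idx =>
    let d := pvDmod distribution element (pvBump 1 1)   -- distribution[element][1] += 1
    (PySem.List.slice keys (some ((idx : Int) + 1)) none).foldl   -- keys[idx+1:]
      (fun d k => pvDmod (pvDmod d k (pvBump 0 1)) k (pvBump 1 1)) d

-- ===== PRECONDITION & SPEC =====
-- Pre_ excludes duplicate keys (the argument is a Python dict, whose keys are
-- unique) and value lists shorter than 2, on which A raises IndexError.
def Pre_update_destribution (distribution : List (String × List Int)) (element : String) : Prop :=
  (distribution.map Prod.fst).Nodup ∧ ∀ kv ∈ distribution, 2 ≤ kv.2.length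
instance (distribution : List (String × List Int)) (element : String) : Decidable (Pre_update_destribution distribution element) := by unfold Pre_update_destribution; infer_instance

def pvWitness_update_destribution : (List (String × List Int)) × String :=
  ([("a", [1, 2]), ("b", [3, 4])], "a")

def Spec_update_destribution (distribution : List (String × List Int)) (element : String) (out : List (String × List Int)) : Prop := out = update_destribution_alt distribution element
instance (distribution : List (String × List Int)) (element : String) (out : List (String × List Int)) : Decidable (Spec_update_destribution distribution element out) := by unfold Spec_update_destribution; infer_instance

-- ===== CLAIM (what is proved, stated in full; the proofs are below) =====
def Claim_equal_update_destribution : Prop := ∀ (distribution : List (String × List Int)) (element : String), Dom_update_destribution distribution element → Pre_update_destribution distribution element → Spec_update_destribution distribution element (update_destribution distribution element)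

-- ===== LEMMAS AND PROOFS =====

-- the step function of A's fold, named for the lemmas
def pvStepA (e : String) (st : List (String × List Int) × Int) (i : String) :
    List (String × List Int) × Int :=
  let d := pvDmod st.1 i (pvBump 0 st.2)
  let d := pvDmod d i (pvBump 1 st.2)
  if i = e then (pvDmod d i (pvBump 1 1), st.2 + 1) else (d, st.2)

theorem update_destribution_eq_foldA (d : List (String × List Int)) (e : String) :
    update_destribution d e = ((d.map Prod.fst).foldl (pvStepA e) (d, 0)).1 := rfl

theorem pvBump_zero_id (j : Nat) (v : List Int) (hj : j < v.length) :
    pvBump j 0 v = v := by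
  simp [pvBump, List.getD, List.getElem?_eq_getElem hj, List.set_getElem_self]

theorem pvDmod_bump_zero (d : List (String × List Int)) (k : String) (j : Nat)
    (hj : j < 2) (h2 : ∀ kv ∈ d, 2 ≤ kv.2.length) :
    pvDmod d k (pvBump j 0) = d := by
  induction d with
  | nil => rfl
  | cons kv rest ih =>
    obtain ⟨k', v⟩ := kv
    by_cases h : k' = k
    · have hv : 2 ≤ v.length := h2 (k', v) (by simp)
      simp [pvDmod, h, pvBump_zero_id j v (by omega)]
    · simp only [pvDmod, if_neg h, List.cons.injEq, true_and]
      exact ih (fun kv hkv => h2 kv (List.mem_cons_of_mem _ hkv))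

-- prefix phase of A: pr = 0 and i ≠ e throughout, so the state is unchanged
theorem pvFoldA_prefix (e : String) (ks : List String) (d : List (String × List Int))
    (hne : ∀ k ∈ ks, k ≠ e) (h2 : ∀ kv ∈ d, 2 ≤ kv.2.length) :
    ks.foldl (pvStepA e) (d, 0) = (d, 0) := by
  induction ks with
  | nil => rfl
  | cons k ks ih =>
    have hk : k ≠ e := hne k (by simp)
    simp only [List.foldl_cons, pvStepA, if_neg hk,
      pvDmod_bump_zero d k 0 (by omega) h2]
    rw [pvDmod_bump_zero d k 1 (by omega) h2]
    exact ih (fun k hk => hne k (List.mem_cons_of_mem _ hk))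

-- suffix phase of A: pr = 1 and i ≠ e throughout, so each step is B's tail step
theorem pvFoldA_suffix (e : String) (ks : List String) (d : List (String × List Int))
    (hne : ∀ k ∈ ks, k ≠ e) :
    (ks.foldl (pvStepA e) (d, 1)).1 =
      ks.foldl (fun d k => pvDmod (pvDmod d k (pvBump 0 1)) k (pvBump 1 1)) d := by
  induction ks generalizing d with
  | nil => rfl
  | cons k ks ih =>
    have hk : k ≠ e := hne k (by simp)
    simp only [List.foldl_cons, pvStepA, if_neg hk]
    exact ih _ (fun k hk => hne k (List.mem_cons_of_mem _ hk))

-- ===== VERDICT (by name: the statement is the Claim_ definition above) =====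
theorem update_destribution_spec : Claim_equal_update_destribution := by
  intro d e _hdom hpre
  obtain ⟨hnd, h2⟩ := hpre
  unfold Spec_update_destribution update_destribution_alt
  rw [update_destribution_eq_foldA]
  cases hidx : PySem.List.index? (d.map Prod.fst) e with
  | none =>
    have he : e ∉ d.map Prod.fst := (PySem.List.index?_eq_none_iff _ _).mp hidx
    simp only [hidx]
    rw [pvFoldA_prefix e _ d (fun k hk => fun h => he (h ▸ hk)) h2]
  | some idx =>
    obtain ⟨pre, suf, hsplit, hlen, hepre⟩ := (PySem.List.index?_eq_some_iff _ _ _).mp hidx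
    simp only [hidx]
    have hpush : ((idx : Int) + 1) = ((idx + 1 : Nat) : Int) := by push_cast; ring
    simp only [hpush, PySem.List.slice_from_natCast]
    rw [hsplit, List.foldl_append]
    have hnepre : ∀ k ∈ pre, k ≠ e := fun k hk h => hepre (h ▸ hk)
    rw [pvFoldA_prefix e pre d hnepre h2]
    have hesuf : e ∉ suf := by
      rw [hsplit] at hnd
      have h := (List.nodup_append.mp hnd).2.1
      exact (List.nodup_cons.mp h).1
    have hlen1 : (pre ++ [e]).length = idx + 1 := by simp [hlen]
    have hdrop : (pre ++ e :: suf).drop (idx + 1) = suf := by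
      rw [show pre ++ e :: suf = (pre ++ [e]) ++ suf by simp, List.drop_left' hlen1]
    rw [hdrop, List.foldl_cons]
    have hstep : pvStepA e (d, 0) e =
        (pvDmod d e (pvBump 1 1), 1) := by
      simp only [pvStepA, if_true, pvDmod_bump_zero d e 0 (by omega) h2,
        pvDmod_bump_zero d e 1 (by omega) h2]
      simp
    rw [hstep, pvFoldA_suffix e suf _ (fun k hk h => hesuf (h ▸ hk))]
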